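-- pv_equiv track=rewrite | github.com/TeeKay-FourTwentyOne/math | proofs_for_submission/verify_proof_gaps.py | compute_A_profile
-- ===== SOURCE A (Python) =====
-- def compute_A_profile(D11_set, p):
--     k = (p - 1) // 2
--     D11 = set(D11_set)
--     profile = []
--     for d in range(1, k + 1):
--         count = sum(1 for x in D11 if (x + d) % p in D11)
--         profile.append(count)
--     return profile
-- ===== SOURCE B (Python) =====
-- def compute_A_profile(D11_set, p):
--     k = (p - 1) // 2
--     if k < 1:
--         return []
--     S = set(D11_set)
--     # the residues of Z_p that belong to the set (its indicator over Z_p)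
--     residues = [r for r in range(p) if r in S]
--     # cnt[d] = number of pairs (x, r) with r a member residue and r ≡ x + d (mod p)
--     cnt = [0] * p
--     for x in S:
--         for r in residues:
--             cnt[(r - x) % p] += 1
--     return cnt[1:k + 1]
-- ===== Notes on version B (the rewrite author's own statement) =====
-- stated objective: faster
-- what changed: Instead of scanning the whole set for every shift d, B builds the set's indicator over Z_p once and counts every pairwise difference (r - x) mod p into one counter array, then slices out shifts 1..k.
import Mathlib
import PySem

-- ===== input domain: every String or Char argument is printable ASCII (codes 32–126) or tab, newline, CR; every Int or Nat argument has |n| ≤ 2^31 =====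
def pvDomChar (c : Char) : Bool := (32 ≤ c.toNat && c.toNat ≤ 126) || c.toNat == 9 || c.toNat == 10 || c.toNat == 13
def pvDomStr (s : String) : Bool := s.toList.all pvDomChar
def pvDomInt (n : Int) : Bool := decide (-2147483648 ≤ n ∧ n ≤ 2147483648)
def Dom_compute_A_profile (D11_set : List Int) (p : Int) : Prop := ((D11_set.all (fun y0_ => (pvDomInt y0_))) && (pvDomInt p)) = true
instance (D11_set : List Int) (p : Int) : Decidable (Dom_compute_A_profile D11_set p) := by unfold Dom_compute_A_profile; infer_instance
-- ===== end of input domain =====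

-- B builds the set's indicator over Z_p once and counts every pairwise
-- difference (r - x) % p into one counter array, then slices out shifts 1..k
-- (faster: no per-shift scan of the set).

-- ===== PORT A =====
def compute_A_profile (D11_set : List Int) (p : Int) : List Int :=
  let k := PySem.Int.floordiv (p - 1) 2
  let D11 : PySem.Set Int := PySem.Set.ofList D11_set
  (PySem.List.pyRange 1 (k + 1) 1).foldl
    (fun profile d =>
      let count : Int :=
        D11.foldl (fun acc x => if PySem.Int.mod (x + d) p ∈ D11 then acc + 1 else acc) 0
      profile ++ [count]) []

-- ===== PORT B =====
def compute_A_profile_alt (D11_set : List Int) (p : Int) : List Int :=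
  let k := PySem.Int.floordiv (p - 1) 2
  if k < 1 then []
  else
    let S : PySem.Set Int := PySem.Set.ofList D11_set
    let residues := (PySem.List.pyRange 0 p 1).filter (fun r => decide (r ∈ S))
    let cnt :=
      S.foldl (fun cnt x =>
        residues.foldl (fun cnt r =>
          PySem.List.pySetD cnt (PySem.Int.mod (r - x) p)
            (PySem.List.pyGetD cnt (PySem.Int.mod (r - x) p) 0 + 1)) cnt)
        (List.replicate p.toNat 0)
    PySem.List.slice cnt (some 1) (some (k + 1))

-- ===== PRECONDITION & SPEC =====
def Spec_compute_A_profile (D11_set : List Int) (p : Int) (out : List Int) : Prop := out = compute_A_profile_alt D11_set p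
instance (D11_set : List Int) (p : Int) (out : List Int) : Decidable (Spec_compute_A_profile D11_set p out) := by unfold Spec_compute_A_profile; infer_instance

-- ===== CLAIM (what is proved, stated in full; the proofs are below) =====
def Claim_equal_compute_A_profile : Prop := ∀ (D11_set : List Int) (p : Int), Dom_compute_A_profile D11_set p → Spec_compute_A_profile D11_set p (compute_A_profile D11_set p)


-- ===== LEMMAS AND PROOFS =====

-- length of the counter array is preserved by the inner increment loop
lemma pv_incr_len (g : Int → Int) (l : List Int) : ∀ c : List Int,
    (l.foldl (fun c y => PySem.List.pySetD c (g y) (PySem.List.pyGetD c (g y) 0 + 1)) c).length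
      = c.length := by
  induction l with
  | nil => intro c; simp
  | cons y l ih =>
      intro c
      simp only [List.foldl_cons]
      rw [ih]
      exact PySem.List.length_pySetD _ _ _

-- one pass of increments adds, at each in-range cell i, the number of hits of i
lemma pv_incr_get (g : Int → Int) (l : List Int) : ∀ (c : List Int) (i : Int),
    (∀ y ∈ l, 0 ≤ g y ∧ g y < (c.length : Int)) → 0 ≤ i → i < (c.length : Int) →
    PySem.List.pyGetD
        (l.foldl (fun c y => PySem.List.pySetD c (g y) (PySem.List.pyGetD c (g y) 0 + 1)) c) i 0
      = PySem.List.pyGetD c i 0 + (l.countP (fun y => g y == i) : Int) := by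
  induction l with
  | nil => intro c i _ _ _; simp
  | cons y l ih =>
      intro c i hg hi0 hip
      simp only [List.foldl_cons]
      have hgy := hg y (List.mem_cons_self ..)
      have hlen : (PySem.List.pySetD c (g y) (PySem.List.pyGetD c (g y) 0 + 1)).length = c.length :=
        PySem.List.length_pySetD _ _ _
      rw [ih _ i (by intro z hz; rw [hlen]; exact hg z (List.mem_cons_of_mem _ hz)) hi0
            (by rw [hlen]; exact hip)]
      have hset : PySem.List.pyGetD (PySem.List.pySetD c (g y) (PySem.List.pyGetD c (g y) 0 + 1)) i 0
          = if g y = i then PySem.List.pyGetD c (g y) 0 + 1 else PySem.List.pyGetD c i 0 := by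
        rw [PySem.List.pySetD_of_nonneg _ _ hgy.1]
        have hjl : (g y).toNat < c.length := by omega
        have hil : i.toNat < c.length := by omega
        rw [PySem.List.pyGetD_eq_getElem _ _ hi0 (by simpa using hip)]
        rw [List.getElem_set]
        by_cases h : g y = i
        · simp [h]
        · rw [if_neg (by omega : ¬ (g y).toNat = i.toNat), if_neg h,
              PySem.List.pyGetD_eq_getElem _ _ hi0 (by simpa using hip)]
      rw [hset, List.countP_cons]
      by_cases h : g y = i
      · simp [h]; ring
      · simp [h]

-- length of the counter array is preserved by the whole double loop
lemma pv_outer_len (T : List Int) (p : Int) (xs : List Int) : ∀ c : List Int,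
    (xs.foldl (fun cnt x =>
      T.foldl (fun cnt r =>
        PySem.List.pySetD cnt (PySem.Int.mod (r - x) p)
          (PySem.List.pyGetD cnt (PySem.Int.mod (r - x) p) 0 + 1)) cnt) c).length
      = c.length := by
  induction xs with
  | nil => intro c; simp
  | cons x xs ih =>
      intro c
      simp only [List.foldl_cons]
      rw [ih]
      exact pv_incr_len (fun r => PySem.Int.mod (r - x) p) T c

-- the nested double loop of B: cell i of the counter counts, for every x, the
-- matching residues r
lemma pv_outer_get (T : List Int) (p : Int) (hp : 0 < p) (xs : List Int) : ∀ (c : List Int) (i : Int),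
    c.length = p.toNat → 0 ≤ i → i < p →
    PySem.List.pyGetD
        (xs.foldl (fun cnt x =>
          T.foldl (fun cnt r =>
            PySem.List.pySetD cnt (PySem.Int.mod (r - x) p)
              (PySem.List.pyGetD cnt (PySem.Int.mod (r - x) p) 0 + 1)) cnt) c) i 0
      = PySem.List.pyGetD c i 0
        + ((xs.map (fun x => (T.countP (fun r => PySem.Int.mod (r - x) p == i) : Int))).sum) := by
  induction xs with
  | nil => intro c i _ _ _; simp
  | cons x xs ih =>
      intro c i hc hi0 hip
      simp only [List.foldl_cons]
      have hlen : (T.foldl (fun cnt r =>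
            PySem.List.pySetD cnt (PySem.Int.mod (r - x) p)
              (PySem.List.pyGetD cnt (PySem.Int.mod (r - x) p) 0 + 1)) c).length = c.length :=
        pv_incr_len (fun r => PySem.Int.mod (r - x) p) T c
      have h1 := pv_incr_get (fun r => PySem.Int.mod (r - x) p) T c i
            (by intro r _
                refine ⟨PySem.Int.mod_nonneg _ hp, ?_⟩
                show PySem.Int.mod (r - x) p < (c.length : Int)
                have := PySem.Int.mod_lt (r - x) hp
                omega)
            hi0 (by show i < (c.length : Int); omega)
      rw [ih _ i (by rw [hlen]; exact hc) hi0 hip, h1]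
      simp only [List.map_cons, List.sum_cons]
      ring

-- pointwise: among the member residues, exactly one r has (r - x) % p = d
-- when (x + d) % p is in the set, and none otherwise
lemma pv_count_shift (S : List Int) (p x d : Int) (hp : 0 < p)
    (hd0 : 0 ≤ d) (hdp : d < p) :
    (((PySem.List.pyRange 0 p 1).filter (fun r => decide (r ∈ S))).countP
        (fun r => PySem.Int.mod (r - x) p == d) : Int)
      = if PySem.Int.mod (x + d) p ∈ S then 1 else 0 := by
  set T := (PySem.List.pyRange 0 p 1).filter (fun r => decide (r ∈ S)) with hT
  set v := PySem.Int.mod (x + d) p with hv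
  have hvemod : v = (x + d) % p := by rw [hv, PySem.Int.mod_eq_emod_of_pos hp]
  have hv0 : 0 ≤ v := PySem.Int.mod_nonneg _ hp
  have hvp : v < p := PySem.Int.mod_lt _ hp
  have key : ∀ r : Int, 0 ≤ r → r < p → ((r - x) % p = d ↔ r = v) := by
    intro r hr0 hrp
    constructor
    · intro h
      have h1 : r % p = (x + d) % p := by
        calc r % p = (r - x + x) % p := by ring_nf
        _ = ((r - x) % p + x) % p := (Int.emod_add_emod _ _ _).symm
        _ = (d + x) % p := by rw [h]
        _ = (x + d) % p := by ring_nf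
      rw [Int.emod_eq_of_lt hr0 hrp] at h1
      rw [hvemod]; exact h1
    · intro h
      subst h
      rw [hvemod, Int.emod_def (x + d) p]
      have : x + d - p * ((x + d) / p) - x = d - p * ((x + d) / p) := by ring
      rw [this, Int.sub_mul_emod_self_left, Int.emod_eq_of_lt hd0 hdp]
  have hpred : ∀ r ∈ T, ((PySem.Int.mod (r - x) p == d) = true ↔ (r == v) = true) := by
    intro r hr
    have hr' : r ∈ PySem.List.pyRange 0 p 1 := List.mem_of_mem_filter hr
    rw [PySem.List.mem_pyRange_one] at hr'
    simp only [beq_iff_eq, PySem.Int.mod_eq_emod_of_pos hp]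
    exact key r hr'.1 hr'.2
  rw [List.countP_congr hpred]
  have hTn : T.Nodup := (PySem.List.nodup_pyRange_one 0 p).filter _
  have hcnt : T.countP (fun r => r == v) = T.count v := by
    simp [List.count_eq_countP]
  rw [hcnt]
  by_cases hmem : v ∈ S
  · have hvT : v ∈ T := by
      rw [hT]
      exact List.mem_filter.2 ⟨PySem.List.mem_pyRange_one.2 ⟨hv0, hvp⟩, by simpa using hmem⟩
    rw [List.count_eq_one_of_mem hTn hvT, if_pos hmem]; norm_num
  · have hvT : v ∉ T := fun h => hmem (by simpa using (List.mem_filter.1 h).2)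
    rw [List.count_eq_zero_of_not_mem hvT, if_neg hmem]; norm_num

-- ===== VERDICT (by name: the statement is the Claim_ definition above) =====
theorem compute_A_profile_spec : Claim_equal_compute_A_profile := by
  intro D11_set p _
  unfold Spec_compute_A_profile
  simp only [compute_A_profile, compute_A_profile_alt]
  by_cases hk1 : PySem.Int.floordiv (p - 1) 2 < 1
  · rw [if_pos hk1, PySem.List.pyRange_one_eq_nil (by omega), List.foldl_nil]
  · rw [if_neg hk1]
    have hk1' : 1 ≤ PySem.Int.floordiv (p - 1) 2 := by omega
    have e := PySem.Int.floordiv_mul_add_mod (p - 1) 2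
    have m1 := PySem.Int.mod_nonneg (p - 1) (by norm_num : (0:Int) < 2)
    have m2 := PySem.Int.mod_lt (p - 1) (by norm_num : (0:Int) < 2)
    have hp3 : 3 ≤ p := by omega
    have hkp : PySem.Int.floordiv (p - 1) 2 < p := by omega
    have hp : (0:Int) < p := by omega
    set k := PySem.Int.floordiv (p - 1) 2 with hk
    set S : List Int := PySem.Set.ofList D11_set with hs
    set T : List Int := (PySem.List.pyRange 0 p 1).filter (fun r => decide (r ∈ S)) with ht
    set cnt : List Int := S.foldl (fun cnt x =>
          T.foldl (fun cnt r =>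
            PySem.List.pySetD cnt (PySem.Int.mod (r - x) p)
              (PySem.List.pyGetD cnt (PySem.Int.mod (r - x) p) 0 + 1)) cnt)
          (List.replicate p.toNat 0) with hcnt
    have hclen : cnt.length = p.toNat := by
      rw [hcnt, pv_outer_len T p S (List.replicate p.toNat 0)]
      simp
    rw [PySem.List.foldl_append_singleton_eq_map, List.nil_append,
        PySem.List.slice_toNat _ (by norm_num) (by omega)]
    apply List.ext_getElem
    · simp only [List.length_map, PySem.List.length_pyRange_one, List.length_take,
        List.length_drop, hclen]
      omega
    · intro n h1 h2
      have hn : n < k.toNat := by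
        simpa [PySem.List.length_pyRange_one] using h1
      rw [List.getElem_map, PySem.List.getElem_pyRange_one _ _ _ (by
            simpa [PySem.List.length_pyRange_one] using hn)]
      rw [List.getElem_take, List.getElem_drop]
      simp only [Int.toNat_one]
      -- the B side: cell 1 + n of the counter
      have hd0 : (0:Int) ≤ 1 + (n:Int) := by omega
      have hdp : 1 + (n:Int) < p := by omega
      have hmain := pv_outer_get T p hp S (List.replicate p.toNat 0) (1 + (n:Int))
        (by simp) hd0 hdp
      have hbase : PySem.List.pyGetD (List.replicate p.toNat (0:Int)) (1 + (n:Int)) 0 = 0 := by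
        rw [PySem.List.pyGetD_eq_getElem _ _ hd0 (by simp; omega)]
        simp
      rw [hbase] at hmain
      rw [← hcnt] at hmain
      rw [PySem.List.pyGetD_eq_getElem _ _ hd0 (by rw [hclen]; omega)] at hmain
      have hidx : ((1:Int) + (n:Int)).toNat = 1 + n := by omega
      simp only [hidx] at hmain
      rw [hmain]
      -- the A side: count of the set elements surviving the shift
      rw [PySem.List.foldl_ite_add_one (fun x => PySem.Int.mod (x + (1 + (n:Int))) p ∈ S) S 0]
      have hterm : (fun x => ((T.countP (fun r => PySem.Int.mod (r - x) p == 1 + (n:Int)) : Nat) : Int))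
          = fun x => if PySem.Int.mod (x + (1 + (n:Int))) p ∈ S then (1:Int) else 0 := by
        funext x
        rw [ht]
        exact pv_count_shift S p x (1 + (n:Int)) hp hd0 hdp
      rw [hterm]
      have hsum : (S.map (fun x => if PySem.Int.mod (x + (1 + (n:Int))) p ∈ S then (1:Int) else 0)).sum
          = (S.countP (fun x => decide (PySem.Int.mod (x + (1 + (n:Int))) p ∈ S)) : Int) := by
        rw [← PySem.List.sum_map_ite_one_zero (fun x => decide (PySem.Int.mod (x + (1 + (n:Int))) p ∈ S)) S]
        simp
      rw [hsum]
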